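-- pv_equiv track=rewrite | github.com/daniel-reich/ubiquitous-fiesta | eRY7eBD8dan54acgG_8.py | is_checkerboard
-- ===== SOURCE A (Python) =====
-- def is_checkerboard(lst):
--   n = len(lst)
--   v1 = [i % 2 == 0 for i in range(n)]
--   v0 = [i % 2 == 1 for i in range(n)]
--   v, k = [v0, v1], 0
--   if lst[0][0] == 1:
--     k = 1
--   for i in range(len(lst)):
--     if lst[i] != v[k]:
--       return False
--     k = 1 - k
--   return True
-- ===== SOURCE B (Python) =====
-- def is_checkerboard(lst):
--   n = len(lst)
--   start = lst[0][0] == 1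
--   for i, row in enumerate(lst):
--     if len(row) != n:
--       return False
--     for j, x in enumerate(row):
--       if x not in (0, 1) or (x == 1) != (((i + j) % 2 == 0) == start):
--         return False
--   return True
-- ===== Notes on version B (the rewrite author's own statement) =====
-- stated objective: idiomatic
-- what changed: B checks each cell directly against the (i+j)-parity colour derived from lst[0][0] (rejecting wrong-length rows first), instead of building two reference boolean rows and comparing whole rows against them with an alternating index.
import Mathlib
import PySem

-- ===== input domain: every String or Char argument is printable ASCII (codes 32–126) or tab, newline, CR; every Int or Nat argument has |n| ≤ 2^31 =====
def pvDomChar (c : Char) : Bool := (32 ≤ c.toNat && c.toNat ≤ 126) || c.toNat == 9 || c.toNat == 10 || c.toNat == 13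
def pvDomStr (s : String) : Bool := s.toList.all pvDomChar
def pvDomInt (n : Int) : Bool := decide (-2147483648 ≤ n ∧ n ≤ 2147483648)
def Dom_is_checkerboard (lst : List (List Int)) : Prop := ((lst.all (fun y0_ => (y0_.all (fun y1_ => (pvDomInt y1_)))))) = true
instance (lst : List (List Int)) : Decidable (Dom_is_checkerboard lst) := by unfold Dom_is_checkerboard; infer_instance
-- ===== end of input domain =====

-- B re-implements the checkerboard test cell-by-cell via (i+j) parity instead of building
-- and comparing reference boolean rows; objective: simpler/idiomatic, same asymptotic cost.

-- ===== PORT A =====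
-- Python compares a row of ints against a list of bools; in Python True == 1 and
-- False == 0 (and no other int equals a bool), so the comparison is exact as
-- 'r == pat.map (fun b => if b then 1 else 0)'.
def pvLoopA (v0 v1 : List Bool) : List (List Int) → Int → Bool
  | [], _ => true
  | r :: rest, k =>
    if r ≠ ((if k = 1 then v1 else v0).map (fun b => if b then (1 : Int) else 0)) then
      false
    else
      pvLoopA v0 v1 rest (1 - k)

def is_checkerboard (lst : List (List Int)) : Bool :=
  let n := lst.length
  let v1 := (List.range n).map (fun i => decide (i % 2 = 0))
  let v0 := (List.range n).map (fun i => decide (i % 2 = 1))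
  -- lst[0][0]; Python raises IndexError when lst or lst[0] is empty (excluded by Pre_)
  let first := (PySem.List.pyGet? lst 0).bind (fun r => PySem.List.pyGet? r 0)
  let k : Int := if first = some 1 then 1 else 0
  pvLoopA v0 v1 lst k

-- ===== PORT B =====
def is_checkerboard_alt (lst : List (List Int)) : Bool :=
  let n := lst.length
  let first := (PySem.List.pyGet? lst 0).bind (fun r => PySem.List.pyGet? r 0)
  let start : Bool := first == some 1
  (lst.zipIdx).all (fun ri =>
    (ri.1.length == n) &&
    (ri.1.zipIdx).all (fun xj =>
      (xj.1 == 0 || xj.1 == 1) &&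
      ((xj.1 == 1) == (decide ((ri.2 + xj.2) % 2 = 0) == start))))

-- ===== PRECONDITION & SPEC =====
-- A (and B) evaluate lst[0][0] first, an IndexError when lst or its first row is empty.
def Pre_is_checkerboard (lst : List (List Int)) : Prop := lst ≠ [] ∧ lst.headD [] ≠ []
instance (lst : List (List Int)) : Decidable (Pre_is_checkerboard lst) := by
  unfold Pre_is_checkerboard; infer_instance

def pvWitness_is_checkerboard : List (List Int) := [[1, 0], [0, 1]]

def Spec_is_checkerboard (lst : List (List Int)) (out : Bool) : Prop := out = is_checkerboard_alt lst
instance (lst : List (List Int)) (out : Bool) : Decidable (Spec_is_checkerboard lst out) := by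
  unfold Spec_is_checkerboard; infer_instance

-- ===== CLAIM (what is proved, stated in full; the proofs are below) =====
def Claim_equal_is_checkerboard : Prop := ∀ (lst : List (List Int)), Dom_is_checkerboard lst → Pre_is_checkerboard lst → Spec_is_checkerboard lst (is_checkerboard lst)

-- ===== LEMMAS AND PROOFS =====

theorem pvCell_eq (x : Int) (e : Bool) :
    ((x == 0 || x == 1) && ((x == 1) == e)) = (x == (if e then (1 : Int) else 0)) := by
  by_cases h1 : x = 1
  · cases e <;> simp [h1]
  · have b1 : (x == 1) = false := beq_eq_false_iff_ne.mpr h1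
    cases e <;> simp [b1]

theorem pvRow_eq (f : Nat → Int) :
    ∀ (r : List Int) (n a : Nat),
      (decide (r = (List.range' a n 1).map f)) =
        ((r.length == n) && (r.zipIdx a).all (fun p => p.1 == f p.2)) := by
  intro r
  induction r with
  | nil =>
    intro n a
    cases n <;> simp [List.range']
  | cons x rx ih =>
    intro n a
    cases n with
    | zero => simp [List.range']
    | succ m =>
      simp only [List.range', List.map, List.zipIdx, List.all_cons, List.length_cons]
      have h := ih m (a + 1)
      by_cases hx : x = f a <;> by_cases hr : rx = (List.range' (a + 1) m 1).map f <;>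
        simp_all <;> exact h

def pvKOf (start : Bool) (i : Nat) : Int :=
  if (decide (i % 2 = 0)) == start then 1 else 0

theorem pvKOf_succ (start : Bool) (i : Nat) : 1 - pvKOf start i = pvKOf start (i + 1) := by
  unfold pvKOf
  have h : (i + 1) % 2 = 0 ↔ ¬ (i % 2 = 0) := by omega
  cases start <;> simp [h] <;> split_ifs <;> simp_all

theorem pvPattern_eq (n : Nat) (start : Bool) (i : Nat) :
    ((if pvKOf start i = 1 then (List.range n).map (fun j => decide (j % 2 = 0))
      else (List.range n).map (fun j => decide (j % 2 = 1))).map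
        (fun b => if b then (1 : Int) else 0)) =
      (List.range' 0 n 1).map
        (fun j => if (decide ((i + j) % 2 = 0) == start) then (1 : Int) else 0) := by
  rw [List.range_eq_range']
  by_cases hk : (decide (i % 2 = 0)) == start <;>
    · simp [pvKOf, hk, List.map_map]
      intro j _
      have h2 : ((i + j) % 2 = 0) ↔ ((i % 2 = 0) ↔ (j % 2 = 0)) := by omega
      cases start <;> simp_all

theorem pvLoop_eq (n : Nat) (start : Bool) :
    ∀ (rows : List (List Int)) (i : Nat),
      pvLoopA ((List.range n).map (fun j => decide (j % 2 = 1)))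
              ((List.range n).map (fun j => decide (j % 2 = 0)))
              rows (pvKOf start i) =
      (rows.zipIdx i).all (fun ri =>
        (ri.1.length == n) &&
        (ri.1.zipIdx).all (fun xj =>
          (xj.1 == 0 || xj.1 == 1) &&
          ((xj.1 == 1) == (decide ((ri.2 + xj.2) % 2 = 0) == start)))) := by
  intro rows
  induction rows with
  | nil => intro i; simp [pvLoopA]
  | cons r rest ih =>
    intro i
    simp only [pvLoopA, List.zipIdx, List.all_cons]
    rw [pvKOf_succ, ih (i + 1)]
    have hrow :
        (decide (r = ((if pvKOf start i = 1 then (List.range n).map (fun j => decide (j % 2 = 0))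
            else (List.range n).map (fun j => decide (j % 2 = 1))).map
              (fun b => if b then (1 : Int) else 0)))) =
          ((r.length == n) && (r.zipIdx 0).all (fun xj =>
            (xj.1 == 0 || xj.1 == 1) &&
            ((xj.1 == 1) == (decide ((i + xj.2) % 2 = 0) == start)))) := by
      rw [pvPattern_eq n start i,
        pvRow_eq (fun j => if (decide ((i + j) % 2 = 0) == start) then (1 : Int) else 0) r n 0]
      simp only [pvCell_eq]
    by_cases hr : r = ((if pvKOf start i = 1 then (List.range n).map (fun j => decide (j % 2 = 0))
        else (List.range n).map (fun j => decide (j % 2 = 1))).map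
          (fun b => if b then (1 : Int) else 0))
    · simp only [hr, ne_eq, not_true_eq_false, if_false, decide_true] at hrow ⊢
      rw [← hrow]
      simp
    · simp only [hr, ne_eq, not_false_eq_true, if_true, decide_false] at hrow ⊢
      simp [← hrow]

-- ===== VERDICT (by name: the statement is the Claim_ definition above) =====
theorem is_checkerboard_spec : Claim_equal_is_checkerboard := by
  intro lst _hdom hpre
  obtain ⟨hne, hhd⟩ := hpre
  unfold Spec_is_checkerboard is_checkerboard is_checkerboard_alt
  obtain ⟨r0, rest, rfl⟩ : ∃ r0 rest, lst = r0 :: rest :=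
    ⟨lst.headD [], lst.tail, by cases lst <;> simp_all⟩
  obtain ⟨x, r0t, rfl⟩ : ∃ x r0t, r0 = x :: r0t :=
    ⟨r0.headD 0, r0.tail, by cases r0 <;> simp_all⟩
  simp only [PySem.List.pyGet?_zero_cons, Option.bind_some]
  have hk : (if (some x = some 1) then (1 : Int) else 0) = pvKOf (some x == some 1) 0 := by
    unfold pvKOf
    by_cases hx : x = 1 <;> simp [hx]
  rw [hk, pvLoop_eq ((x :: r0t) :: rest).length (some x == some 1) ((x :: r0t) :: rest) 0]
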